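-- pv_equiv track=rewrite | github.com/zfifteen/prime-gap-structure | benchmarks/python/predictor/simple_pgs_solution_07_seed_erasure_probe.py | candidate_stream
-- ===== SOURCE A (Python) =====
-- from math import isqrt
--
-- WHEEL_OPEN_RESIDUES_MOD30 = {1, 7, 11, 13, 17, 19, 23, 29}
--
-- def divisor_witness(n: int, max_divisor: int) -> int | None:
--     for divisor in range(2, min(isqrt(int(n)), int(max_divisor)) + 1):
--         if int(n) % divisor == 0:
--             return divisor
--     return None
--
-- def visible_open(n: int, visible_divisor_bound: int) -> bool:
--     if int(n) % 30 not in WHEEL_OPEN_RESIDUES_MOD30: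
--         return False
--     return divisor_witness(int(n), int(visible_divisor_bound)) is None
--
-- def candidate_stream(
--     p: int,
--     seed: int,
--     candidate_bound: int,
--     visible_divisor_bound: int,
-- ) -> list[int]:
--     upper = int(p) + int(candidate_bound)
--     return [
--         n
--         for n in range(int(seed) + 1, upper + 1)
--         if visible_open(n, visible_divisor_bound)
--     ]
-- ===== SOURCE B (Python) =====
-- WHEEL_OPEN_RESIDUES_MOD30 = {1, 7, 11, 13, 17, 19, 23, 29}
--
-- def candidate_stream(p, seed, candidate_bound, visible_divisor_bound):
--     lo = int(seed) + 1
--     hi = int(p) + int(candidate_bound)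
--     composite = set()
--     d = 2
--     while d <= int(visible_divisor_bound) and d * d <= hi:
--         # first multiple of d that is >= d*d and >= lo
--         m = max(d * d, ((lo + d - 1) // d) * d)
--         while m <= hi:
--             composite.add(m)
--             m += d
--         d += 1
--     return [n for n in range(lo, hi + 1)
--             if n % 30 in WHEEL_OPEN_RESIDUES_MOD30 and n not in composite]
-- ===== Notes on version B (the rewrite author's own statement) =====
-- stated objective: faster
-- what changed: Replaces per-candidate trial division (scan d up to min(isqrt(n), bound) for every n) by a segmented sieve: each divisor d up to the bound marks its multiples from max(d*d, first multiple >= lo) into a composite set once, then open-residue unmarked numbers are emitted.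
-- outside the precondition, e.g. on candidate_stream(0, -29, -26, 10): A returns [], B returns []
import Mathlib
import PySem

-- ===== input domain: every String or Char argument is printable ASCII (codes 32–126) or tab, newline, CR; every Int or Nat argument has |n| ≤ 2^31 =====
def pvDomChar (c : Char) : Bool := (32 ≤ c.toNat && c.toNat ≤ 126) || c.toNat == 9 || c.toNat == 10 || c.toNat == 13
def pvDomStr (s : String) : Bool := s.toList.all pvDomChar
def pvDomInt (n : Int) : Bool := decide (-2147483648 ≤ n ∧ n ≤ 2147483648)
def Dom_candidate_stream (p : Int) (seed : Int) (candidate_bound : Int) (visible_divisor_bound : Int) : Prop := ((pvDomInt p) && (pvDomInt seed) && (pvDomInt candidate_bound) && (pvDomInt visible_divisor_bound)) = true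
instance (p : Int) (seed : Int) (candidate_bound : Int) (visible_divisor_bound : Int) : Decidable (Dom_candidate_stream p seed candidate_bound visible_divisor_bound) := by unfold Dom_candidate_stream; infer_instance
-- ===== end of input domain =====

-- B replaces A's per-candidate trial division by a segmented sieve (each divisor marks its multiples
-- from max(d*d, first multiple ≥ lo) into a set once); measured faster on large ranges.

-- ===== PORT A =====
def WHEEL_OPEN_RESIDUES_MOD30 : PySem.Set Int := PySem.Set.ofList [1, 7, 11, 13, 17, 19, 23, 29]

-- math.isqrt ported as Int.sqrt: exact for n ≥ 0; Python raises ValueError for n < 0 (excluded by Pre_)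
def divisor_witness (n : Int) (max_divisor : Int) : Option Int :=
  (PySem.List.pyRange 2 (min (Int.sqrt n) max_divisor + 1) 1).find?
    (fun divisor => PySem.Int.mod n divisor == 0)

def visible_open (n : Int) (visible_divisor_bound : Int) : Bool :=
  if !(PySem.Set.contains WHEEL_OPEN_RESIDUES_MOD30 (PySem.Int.mod n 30)) then false
  else (divisor_witness n visible_divisor_bound).isNone

def candidate_stream (p : Int) (seed : Int) (candidate_bound : Int) (visible_divisor_bound : Int) : List Int :=
  let upper := p + candidate_bound
  (PySem.List.pyRange (seed + 1) (upper + 1) 1).filter (fun n => visible_open n visible_divisor_bound)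

-- ===== PORT B =====
def bWheelOpen : PySem.Set Int := PySem.Set.ofList [1, 7, 11, 13, 17, 19, 23, 29]

-- inner while loop of Source B: mark m, m+d, … up to hi ('0 < d' only makes the recursion total; B calls it with d ≥ 2)
def bMarkRun (hi d m : Int) (composite : PySem.Set Int) : PySem.Set Int :=
  if h : 0 < d ∧ m ≤ hi then bMarkRun hi d (m + d) (PySem.Set.add composite m) else composite
termination_by (hi + 1 - m).toNat
decreasing_by omega

-- outer while loop of Source B over divisors d
def bSieve (lo hi vdb d : Int) (composite : PySem.Set Int) : PySem.Set Int :=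
  if h : d ≤ vdb ∧ d * d ≤ hi then
    bSieve lo hi vdb (d + 1)
      (bMarkRun hi d (max (d * d) (PySem.Int.floordiv (lo + d - 1) d * d)) composite)
  else composite
termination_by (vdb + 1 - d).toNat
decreasing_by omega

def candidate_stream_alt (p : Int) (seed : Int) (candidate_bound : Int) (visible_divisor_bound : Int) : List Int :=
  let lo := seed + 1
  let hi := p + candidate_bound
  let composite := bSieve lo hi visible_divisor_bound 2 PySem.Set.empty
  (PySem.List.pyRange lo (hi + 1) 1).filter
    (fun n => PySem.Set.contains bWheelOpen (PySem.Int.mod n 30) && !(PySem.Set.contains composite n))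

-- ===== PRECONDITION & SPEC =====
-- Pre_ excludes nonempty ranges starting below 0 (seed ≤ -2 with seed < p + candidate_bound): there A raises
-- ValueError (math.isqrt of a negative open-residue candidate) except on the few short all-negative ranges that
-- avoid open residues, where A returns [] and B returns [] as well (see the cite in claim.json).
def Pre_candidate_stream (p : Int) (seed : Int) (candidate_bound : Int) (visible_divisor_bound : Int) : Prop :=
  -1 ≤ seed ∨ p + candidate_bound ≤ seed
instance (p : Int) (seed : Int) (candidate_bound : Int) (visible_divisor_bound : Int) : Decidable (Pre_candidate_stream p seed candidate_bound visible_divisor_bound) := by unfold Pre_candidate_stream; infer_instance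

def pvWitness_candidate_stream : Int × Int × Int × Int := (17, 0, 30, 5)

def Spec_candidate_stream (p : Int) (seed : Int) (candidate_bound : Int) (visible_divisor_bound : Int) (out : List Int) : Prop := out = candidate_stream_alt p seed candidate_bound visible_divisor_bound
instance (p : Int) (seed : Int) (candidate_bound : Int) (visible_divisor_bound : Int) (out : List Int) : Decidable (Spec_candidate_stream p seed candidate_bound visible_divisor_bound out) := by unfold Spec_candidate_stream; infer_instance

-- ===== CLAIM (what is proved, stated in full; the proofs are below) =====
def Claim_equal_candidate_stream : Prop := ∀ (p : Int) (seed : Int) (candidate_bound : Int) (visible_divisor_bound : Int), Dom_candidate_stream p seed candidate_bound visible_divisor_bound → Pre_candidate_stream p seed candidate_bound visible_divisor_bound → Spec_candidate_stream p seed candidate_bound visible_divisor_bound (candidate_stream p seed candidate_bound visible_divisor_bound)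

-- ===== LEMMAS AND PROOFS =====

-- d divides the starting point max(d*d, first multiple of d ≥ lo)
theorem dvd_start (lo d : Int) : d ∣ max (d * d) (PySem.Int.floordiv (lo + d - 1) d * d) := by
  rcases max_choice (d * d) (PySem.Int.floordiv (lo + d - 1) d * d) with h | h <;> rw [h]
  · exact dvd_mul_right d d
  · exact dvd_mul_left d _

-- membership after the inner marking loop
theorem mem_bMarkRun (hi d : Int) (hd : 0 < d) (m n : Int) (comp : PySem.Set Int) :
    n ∈ bMarkRun hi d m comp ↔ n ∈ comp ∨ (m ≤ n ∧ n ≤ hi ∧ d ∣ (n - m)) := by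
  fun_induction bMarkRun hi d m comp with
  | case1 m comp h ih =>
    rw [ih, PySem.Set.mem_add]
    constructor
    · rintro ((hc | rfl) | ⟨h1, h2, h3⟩)
      · exact Or.inl hc
      · exact Or.inr ⟨le_refl _, h.2, by simp⟩
      · refine Or.inr ⟨by omega, h2, ?_⟩
        have he : n - m = (n - (m + d)) + d := by ring
        rw [he]; exact dvd_add h3 dvd_rfl
    · rintro (hc | ⟨h1, h2, h3⟩)
      · exact Or.inl (Or.inl hc)
      · rcases eq_or_lt_of_le h1 with rfl | hlt
        · exact Or.inl (Or.inr rfl)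
        · have hle : d ≤ n - m := Int.le_of_dvd (by omega) h3
          refine Or.inr ⟨by omega, h2, ?_⟩
          have he : n - (m + d) = (n - m) - d := by ring
          rw [he]; exact dvd_sub h3 dvd_rfl
  | case2 m comp h =>
    constructor
    · exact Or.inl
    · rintro (hc | ⟨h1, h2, _⟩)
      · exact hc
      · omega

-- membership after the outer divisor loop
theorem mem_bSieve (lo hi vdb : Int) (d0 : Int) (hd0 : 1 ≤ d0) (n : Int) (comp : PySem.Set Int) :
    n ∈ bSieve lo hi vdb d0 comp ↔ n ∈ comp ∨
      ∃ d, d0 ≤ d ∧ d ≤ vdb ∧ d * d ≤ hi ∧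
        (max (d * d) (PySem.Int.floordiv (lo + d - 1) d * d) ≤ n ∧ n ≤ hi ∧
         d ∣ (n - max (d * d) (PySem.Int.floordiv (lo + d - 1) d * d))) := by
  have H : ∀ (fuel : Nat) (d0 : Int) (comp : PySem.Set Int), (vdb + 1 - d0).toNat ≤ fuel → 1 ≤ d0 →
      (n ∈ bSieve lo hi vdb d0 comp ↔ n ∈ comp ∨
        ∃ d, d0 ≤ d ∧ d ≤ vdb ∧ d * d ≤ hi ∧
          (max (d * d) (PySem.Int.floordiv (lo + d - 1) d * d) ≤ n ∧ n ≤ hi ∧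
           d ∣ (n - max (d * d) (PySem.Int.floordiv (lo + d - 1) d * d)))) := by
    intro fuel
    induction fuel with
    | zero =>
      intro d0 comp hf hd0
      have hv : vdb < d0 := by omega
      rw [bSieve]
      rw [dif_neg (by omega)]
      constructor
      · exact Or.inl
      · rintro (hc | ⟨d, h1, h2, _⟩)
        · exact hc
        · omega
    | succ f ih =>
      intro d0 comp hf hd0
      rw [bSieve]
      split_ifs with hc
      · rw [ih (d0 + 1) _ (by omega) (by omega), mem_bMarkRun hi d0 (by omega)]
        constructor
        · rintro ((hcm | hrun) | ⟨d, h1, h2, h3, h4⟩)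
          · exact Or.inl hcm
          · exact Or.inr ⟨d0, le_refl _, hc.1, hc.2, hrun⟩
          · exact Or.inr ⟨d, by omega, h2, h3, h4⟩
        · rintro (hcm | ⟨d, h1, h2, h3, h4⟩)
          · exact Or.inl (Or.inl hcm)
          · rcases eq_or_lt_of_le h1 with rfl | hlt
            · exact Or.inl (Or.inr h4)
            · exact Or.inr ⟨d, by omega, h2, h3, h4⟩
      · constructor
        · exact Or.inl
        · rintro (hcm | ⟨d, h1, h2, h3, _⟩)
          · exact hcm
          · have hdd : d0 * d0 ≤ d * d :=
              mul_le_mul h1 h1 (by omega) (by omega)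
            omega
  exact H (vdb + 1 - d0).toNat d0 comp le_rfl hd0

-- the starting point selects exactly the multiples n ≥ d*d of d in [lo, hi]
theorem start_spec (lo hi d n : Int) (hd : 2 ≤ d) (hlo : lo ≤ n) (hhi : n ≤ hi) :
    (max (d * d) (PySem.Int.floordiv (lo + d - 1) d * d) ≤ n ∧ n ≤ hi ∧
     d ∣ (n - max (d * d) (PySem.Int.floordiv (lo + d - 1) d * d))) ↔ (d ∣ n ∧ d * d ≤ n) := by
  have hd0 : (0 : Int) < d := by omega
  have hds := dvd_start lo d
  have hq1 := PySem.Int.floordiv_mul_add_mod (lo + d - 1) d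
  have hr0 : 0 ≤ PySem.Int.mod (lo + d - 1) d := PySem.Int.mod_nonneg (lo + d - 1) hd0
  have hrlt : PySem.Int.mod (lo + d - 1) d < d := PySem.Int.mod_lt (lo + d - 1) hd0
  constructor
  · rintro ⟨h1, _, h3⟩
    have hdn : d ∣ n := by
      have := dvd_add h3 hds
      simpa using this
    exact ⟨hdn, le_trans (le_max_left _ _) h1⟩
  · rintro ⟨hdn, hsq⟩
    refine ⟨?_, hhi, dvd_sub hdn hds⟩
    obtain ⟨k, hk⟩ := hdn
    have hqk : PySem.Int.floordiv (lo + d - 1) d ≤ k := by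
      by_contra hlt
      have hk1 : k ≤ PySem.Int.floordiv (lo + d - 1) d - 1 := by omega
      have h5 : k * d ≤ (PySem.Int.floordiv (lo + d - 1) d - 1) * d :=
        mul_le_mul_of_nonneg_right hk1 (by omega)
      have h6 : (PySem.Int.floordiv (lo + d - 1) d - 1) * d
          = PySem.Int.floordiv (lo + d - 1) d * d - d := by ring
      have h7 : n = k * d := by rw [hk]; ring
      omega
    have hq : PySem.Int.floordiv (lo + d - 1) d * d ≤ n := by
      rw [hk, mul_comm d k]
      exact mul_le_mul_of_nonneg_right hqk (by omega)
    exact max_le hsq hq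

-- d ≤ isqrt n iff d*d ≤ n (for 0 ≤ n, 0 ≤ d)
theorem le_sqrt_iff (n d : Int) (hn : 0 ≤ n) (hd : 0 ≤ d) : d ≤ Int.sqrt n ↔ d * d ≤ n := by
  have hs : Int.sqrt n = ((Nat.sqrt n.toNat : Nat) : Int) := rfl
  rw [hs]
  have h1 : d ≤ ((Nat.sqrt n.toNat : Nat) : Int) ↔ d.toNat ≤ Nat.sqrt n.toNat := by omega
  have hdt : (d.toNat : Int) = d := Int.toNat_of_nonneg hd
  have hnt : (n.toNat : Int) = n := Int.toNat_of_nonneg hn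
  rw [h1, Nat.le_sqrt, ← Nat.cast_le (α := Int), Nat.cast_mul, hdt, hnt]

-- A's trial division finds a witness iff some divisor d ≤ bound with d*d ≤ n divides n
theorem divisor_witness_isSome (n vdb : Int) (hn : 0 ≤ n) :
    (divisor_witness n vdb).isSome = true ↔ ∃ d, 2 ≤ d ∧ d ≤ vdb ∧ d * d ≤ n ∧ d ∣ n := by
  unfold divisor_witness
  rw [List.find?_isSome]
  constructor
  · rintro ⟨d, hmem, hpred⟩
    rw [PySem.List.mem_pyRange_one] at hmem
    have hmin : d ≤ min (Int.sqrt n) vdb := by omega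
    have hdvd : d ∣ n := by
      have hm0 : PySem.Int.mod n d = 0 := by simpa using hpred
      exact (PySem.Int.mod_eq_zero_iff_dvd n d).mp hm0
    have hsq : d * d ≤ n := (le_sqrt_iff n d hn (by omega)).mp (le_trans hmin (min_le_left _ _))
    exact ⟨d, hmem.1, le_trans hmin (min_le_right _ _), hsq, hdvd⟩
  · rintro ⟨d, h2, hv, hsq, hdvd⟩
    refine ⟨d, ?_, ?_⟩
    · rw [PySem.List.mem_pyRange_one]
      have : d ≤ Int.sqrt n := (le_sqrt_iff n d hn (by omega)).mpr hsq
      constructor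
      · exact h2
      · omega
    · have : PySem.Int.mod n d = 0 := (PySem.Int.mod_eq_zero_iff_dvd n d).mpr hdvd
      simp [this]

-- visible_open written as a conjunction of booleans
theorem visible_open_eq (k vb : Int) :
    visible_open k vb = (PySem.Set.contains WHEEL_OPEN_RESIDUES_MOD30 (PySem.Int.mod k 30)
      && (divisor_witness k vb).isNone) := by
  unfold visible_open
  cases PySem.Set.contains WHEEL_OPEN_RESIDUES_MOD30 (PySem.Int.mod k 30) <;> simp

-- ===== VERDICT (by name: the statement is the Claim_ definition above) =====
theorem candidate_stream_spec : Claim_equal_candidate_stream := by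
  intro p seed cb vdb hDom hPre
  unfold Spec_candidate_stream
  simp only [candidate_stream, candidate_stream_alt]
  rcases hPre with hge | hempty
  · apply List.filter_congr
    intro n hn
    rw [PySem.List.mem_pyRange_one] at hn
    have hn0 : 0 ≤ n := by omega
    rw [visible_open_eq n vdb, (show bWheelOpen = WHEEL_OPEN_RESIDUES_MOD30 from rfl)]
    cases hOpen : PySem.Set.contains WHEEL_OPEN_RESIDUES_MOD30 (PySem.Int.mod n 30)
    · simp
    · simp only [Bool.true_and]
      have hA := divisor_witness_isSome n vdb hn0
      have hB : n ∈ bSieve (seed + 1) (p + cb) vdb 2 PySem.Set.empty ↔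
          ∃ d, 2 ≤ d ∧ d ≤ vdb ∧ d * d ≤ n ∧ d ∣ n := by
        rw [mem_bSieve _ _ _ _ (by omega)]
        constructor
        · rintro (h | ⟨d, h1, h2, h3, hrun⟩)
          · simp [PySem.Set.empty] at h
          · obtain ⟨hdvd, hsq⟩ :=
              (start_spec (seed + 1) (p + cb) d n (by omega) (by omega) (by omega)).mp hrun
            exact ⟨d, h1, h2, hsq, hdvd⟩
        · rintro ⟨d, h1, h2, hsq, hdvd⟩
          refine Or.inr ⟨d, h1, h2, le_trans hsq (by omega),
            (start_spec (seed + 1) (p + cb) d n (by omega) (by omega) (by omega)).mpr ⟨hdvd, hsq⟩⟩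
      have hEq : (divisor_witness n vdb).isSome
          = PySem.Set.contains (bSieve (seed + 1) (p + cb) vdb 2 PySem.Set.empty) n := by
        rw [Bool.eq_iff_iff, hA, PySem.Set.contains_iff, hB]
      have hNone : (divisor_witness n vdb).isNone = !(divisor_witness n vdb).isSome := by
        cases divisor_witness n vdb <;> rfl
      rw [hNone, hEq]
  · rw [PySem.List.pyRange_one_eq_nil (by omega)]
    simp
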